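-- pv_equiv track=rewrite | github.com/Norvoke/middcs150 | Week 6/day16.py | set_symmetric_difference
-- ===== SOURCE A (Python) =====
-- def set_symmetric_difference(set1, set2):
--     """
--     Return symmetric difference of sets set1 and set2
--     """
--     result = set()
--     for element in set1:
--         if element not in set2:
--             result.add(element)
--     for element in set2:
--         if element not in set1:
--             result.add(element)
--     return result
-- ===== SOURCE B (Python) =====
-- def set_symmetric_difference(set1, set2):
--     """
--     Return symmetric difference of sets set1 and set2
--     """
--     s1, s2 = set(set1), set(set2)
--     return (s1 | s2) - (s1 & s2)
-- ===== Notes on version B (the rewrite author's own statement) =====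
-- stated objective: simpler
-- what changed: Replaces A's two element-by-element membership-filtering loops with whole-set algebra: build set(set1) and set(set2) once, then return union minus intersection.
import Mathlib
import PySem

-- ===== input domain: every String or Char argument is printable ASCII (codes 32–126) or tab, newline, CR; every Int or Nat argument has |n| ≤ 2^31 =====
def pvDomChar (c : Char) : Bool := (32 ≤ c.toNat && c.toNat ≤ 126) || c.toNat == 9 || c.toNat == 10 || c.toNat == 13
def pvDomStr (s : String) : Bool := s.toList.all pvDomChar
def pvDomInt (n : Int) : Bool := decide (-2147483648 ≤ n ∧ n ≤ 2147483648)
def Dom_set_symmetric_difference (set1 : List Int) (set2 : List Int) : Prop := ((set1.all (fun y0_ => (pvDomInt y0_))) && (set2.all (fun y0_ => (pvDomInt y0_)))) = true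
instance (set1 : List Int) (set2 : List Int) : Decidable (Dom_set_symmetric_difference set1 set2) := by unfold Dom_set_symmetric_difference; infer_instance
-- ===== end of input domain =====

-- B replaces A's two membership-filtering loops by whole-set algebra (union minus intersection); objective: simpler.


-- ===== PORT A =====
-- result = set(); for element in set1: if element not in set2: result.add(element);
-- for element in set2: if element not in set1: result.add(element); return result
def set_symmetric_difference (set1 : List Int) (set2 : List Int) : List Int :=
  let result : PySem.Set Int := PySem.Set.empty
  let result := set1.foldl (fun r element => if !set2.contains element then PySem.Set.add r element else r) result
  let result := set2.foldl (fun r element => if !set1.contains element then PySem.Set.add r element else r) result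
  result

-- ===== PORT B =====
-- s1, s2 = set(set1), set(set2); return (s1 | s2) - (s1 & s2)
def set_symmetric_difference_alt (set1 : List Int) (set2 : List Int) : List Int :=
  let s1 : PySem.Set Int := PySem.Set.ofList set1
  let s2 : PySem.Set Int := PySem.Set.ofList set2
  PySem.Set.diff (PySem.Set.union s1 s2) (PySem.Set.inter s1 s2)

-- ===== PRECONDITION & SPEC =====
def Spec_set_symmetric_difference (set1 : List Int) (set2 : List Int) (out : List Int) : Prop := out = set_symmetric_difference_alt set1 set2
instance (set1 : List Int) (set2 : List Int) (out : List Int) : Decidable (Spec_set_symmetric_difference set1 set2 out) := by unfold Spec_set_symmetric_difference; infer_instance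

-- ===== CLAIM (what is proved, stated in full; the proofs are below) =====
def Claim_equal_set_symmetric_difference : Prop := ∀ (set1 : List Int) (set2 : List Int), Dom_set_symmetric_difference set1 set2 → Spec_set_symmetric_difference set1 set2 (set_symmetric_difference set1 set2)

-- ===== LEMMAS AND PROOFS =====

-- removing an element the filter rejects anyway does not change the filter
theorem filter_discard_of_false {p : Int → Bool} {x : Int} (hx : p x = false) (l : List Int) :
    List.filter p (PySem.Set.discard l x) = List.filter p l := by
  simp only [PySem.Set.discard, List.filter_filter]
  apply List.filter_congr
  intro y _
  by_cases h : y = x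
  · subst h; simp [hx]
  · simp [h]

-- A's conditional-add loop is Set.update with the failing elements filtered away.
theorem foldl_condAdd_eq_update (t : List Int) :
    ∀ (l : List Int) (s : PySem.Set Int),
      l.foldl (fun r element => if !t.contains element then PySem.Set.add r element else r) s
        = PySem.Set.update s (l.filter (fun e => !t.contains e)) := by
  intro l
  induction l with
  | nil => intro s; rfl
  | cons x l ih =>
      intro s
      rw [List.foldl_cons, List.filter_cons]
      by_cases hx : x ∈ t
      · have hc : (!t.contains x) = false := by simp [List.contains_eq_mem, hx]
        rw [hc]
        simp only [Bool.false_eq_true, if_false]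
        exact ih s
      · have hc : (!t.contains x) = true := by simp [List.contains_eq_mem, hx]
        rw [hc, if_pos rfl, if_pos rfl]
        exact ih (PySem.Set.add s x)

-- Set.update appends exactly the new first occurrences.
theorem update_eq_append_filter :
    ∀ (l : List Int) (s : PySem.Set Int),
      PySem.Set.update s l = s ++ (PySem.Set.ofList l).filter (fun x => !s.contains x) := by
  intro l
  induction l with
  | nil => intro s; simp [PySem.Set.update, PySem.Set.ofList, PySem.Set.empty]
  | cons x l ih =>
      intro s
      rw [show PySem.Set.update s (x :: l) = PySem.Set.update (PySem.Set.add s x) l from rfl,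
          ih, PySem.Set.ofList_cons]
      by_cases hx : x ∈ s
      · rw [PySem.Set.add_of_mem hx]
        have hpx : (!s.contains x) = false := by
          simp [List.contains_eq_mem, hx]
        rw [List.filter_cons, hpx,
            filter_discard_of_false (p := fun y => !s.contains y) hpx]
        simp
      · rw [PySem.Set.add_of_not_mem hx]
        have hpx : (!s.contains x) = true := by
          simp [List.contains_eq_mem, hx]
        rw [List.filter_cons, hpx, if_pos rfl]
        simp only [List.append_assoc, List.singleton_append]
        congr 1
        simp only [PySem.Set.discard, List.filter_filter]
        congr 1
        apply List.filter_congr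
        intro y _
        by_cases hyx : y = x
        · subst hyx; simp [List.contains_eq_mem]
        · simp [List.contains_eq_mem, hyx]

-- set() of a filtered list is the filtered set.
theorem ofList_filter (p : Int → Bool) :
    ∀ (l : List Int),
      PySem.Set.ofList (l.filter p) = (PySem.Set.ofList l).filter p := by
  intro l
  induction l with
  | nil => rfl
  | cons x l ih =>
      by_cases hx : p x = true
      · rw [List.filter_cons_of_pos hx, PySem.Set.ofList_cons, PySem.Set.ofList_cons, ih,
            List.filter_cons_of_pos hx]
        congr 1
        simp only [PySem.Set.discard, List.filter_comm]
      · have hx' : p x = false := by simpa using hx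
        rw [List.filter_cons_of_neg (by simp [hx']), PySem.Set.ofList_cons, ih,
            List.filter_cons, hx', filter_discard_of_false hx']
        simp only [Bool.false_eq_true, if_false]

theorem A_normal_form (set1 set2 : List Int) :
    set_symmetric_difference set1 set2
      = (PySem.Set.ofList set1).filter (fun x => !set2.contains x)
        ++ (PySem.Set.ofList set2).filter (fun x => !set1.contains x) := by
  show (set2.foldl _ (set1.foldl _ PySem.Set.empty)) = _
  rw [foldl_condAdd_eq_update, foldl_condAdd_eq_update]
  have h1 : PySem.Set.update PySem.Set.empty
      (set1.filter (fun e => !set2.contains e))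
      = PySem.Set.ofList (set1.filter (fun e => !set2.contains e)) := rfl
  rw [h1, update_eq_append_filter, ofList_filter, ofList_filter]
  congr 1
  rw [List.filter_eq_self]
  intro y hy
  have hy1 : y ∉ set1 := by
    have := (List.mem_filter.mp hy).2
    simpa [List.contains_eq_mem] using this
  simp [PySem.Set.contains_eq_listContains, List.contains_eq_mem, List.mem_filter,
    PySem.Set.mem_ofList, hy1]

theorem B_normal_form (set1 set2 : List Int) :
    set_symmetric_difference_alt set1 set2
      = (PySem.Set.ofList set1).filter (fun x => !set2.contains x)
        ++ (PySem.Set.ofList set2).filter (fun x => !set1.contains x) := by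
  show PySem.Set.diff (PySem.Set.union _ _) (PySem.Set.inter _ _) = _
  rw [show ∀ s t : PySem.Set Int, PySem.Set.union s t = PySem.Set.update s t from fun _ _ => rfl,
      update_eq_append_filter, PySem.Set.ofList_ofList]
  simp only [PySem.Set.diff, PySem.Set.inter, List.filter_append]
  congr 1
  · apply List.filter_congr
    intro y hy
    have hys1 : y ∈ set1 := by simpa [PySem.Set.mem_ofList] using hy
    by_cases h2 : y ∈ set2
    · simp [List.contains_eq_mem, h2, hys1]
    · simp [List.contains_eq_mem, h2]
  · rw [List.filter_filter]
    apply List.filter_congr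
    intro y _
    by_cases h1 : y ∈ set1
    · simp [List.contains_eq_mem, h1]
    · simp [List.contains_eq_mem, h1]

-- ===== VERDICT (by name: the statement is the Claim_ definition above) =====
theorem set_symmetric_difference_spec : Claim_equal_set_symmetric_difference := by
  intro set1 set2 _
  show set_symmetric_difference set1 set2 = set_symmetric_difference_alt set1 set2
  rw [A_normal_form, B_normal_form]
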